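-- pv_equiv track=rewrite | github.com/Chaplot05/HypothesisAi | app.py | infer_expected_direction
-- ===== SOURCE A (Python) =====
-- def infer_expected_direction(hypothesis):
--     """Infer expected relationship direction from hypothesis text."""
--     hypothesis_lower = hypothesis.lower()
--
--     positive_keywords = [
--         'more', 'increase', 'higher', 'greater', 'improve', 'better',
--         'raise', 'enhance', 'boost', 'grow', 'leads to', 'results in',
--         'positively', 'correlates with'
--     ]
--
--     negative_keywords = [
--         'less', 'decrease', 'lower', 'reduce', 'fewer', 'worse',
--         'decline', 'diminish', 'drop', 'fall', 'negatively'
--     ]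
--
--     positive_count = sum(1 for kw in positive_keywords if kw in hypothesis_lower)
--     negative_count = sum(1 for kw in negative_keywords if kw in hypothesis_lower)
--
--     if positive_count > negative_count:
--         return 'positive'
--     elif negative_count > positive_count:
--         return 'negative'
--     return 'unknown'
-- ===== SOURCE B (Python) =====
-- POSITIVE_KEYWORDS = [
--     'more', 'increase', 'higher', 'greater', 'improve', 'better',
--     'raise', 'enhance', 'boost', 'grow', 'leads to', 'results in',
--     'positively', 'correlates with'
-- ]
--
-- NEGATIVE_KEYWORDS = [
--     'less', 'decrease', 'lower', 'reduce', 'fewer', 'worse',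
--     'decline', 'diminish', 'drop', 'fall', 'negatively'
-- ]
--
-- ALL_KEYWORDS = POSITIVE_KEYWORDS + NEGATIVE_KEYWORDS
--
--
-- def infer_expected_direction(hypothesis):
--     """Infer expected relationship direction from hypothesis text.
--
--     Text-driven scan: walk the lowered text position by position and record every
--     keyword that starts at the current position, then classify the found set.
--     """
--     text = hypothesis.lower()
--     found = set()
--     for i in range(len(text)):
--         for kw in ALL_KEYWORDS:
--             if kw not in found and text.startswith(kw, i):
--                 found.add(kw)
--     p = sum(1 for kw in POSITIVE_KEYWORDS if kw in found)
--     n = sum(1 for kw in NEGATIVE_KEYWORDS if kw in found)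
--     if p > n:
--         return 'positive'
--     if n > p:
--         return 'negative'
--     return 'unknown'
-- ===== Notes on version B (the rewrite author's own statement) =====
-- stated objective: alternative
-- what changed: Replaced A's keyword-driven substring membership tests ('kw in text' per keyword) by a text-driven scan: one walk over the lowered text's suffixes collecting into a set every keyword that starts at each position, then classifying the found set.
import Mathlib
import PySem

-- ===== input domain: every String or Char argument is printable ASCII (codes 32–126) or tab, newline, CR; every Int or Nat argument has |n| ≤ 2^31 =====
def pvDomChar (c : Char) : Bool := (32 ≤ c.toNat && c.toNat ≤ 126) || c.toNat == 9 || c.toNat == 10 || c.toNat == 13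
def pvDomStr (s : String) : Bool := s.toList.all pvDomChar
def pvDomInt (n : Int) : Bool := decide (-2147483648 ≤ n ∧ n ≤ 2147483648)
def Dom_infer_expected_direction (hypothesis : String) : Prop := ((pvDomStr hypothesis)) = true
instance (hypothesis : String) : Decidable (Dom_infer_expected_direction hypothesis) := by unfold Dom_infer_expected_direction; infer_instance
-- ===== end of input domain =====

-- B replaces A's keyword-driven substring tests by a text-driven scan over the
-- lowered text's positions collecting matched keywords into a set (objective: alternative).

-- ===== PORT A =====
def pvPosKw : List String :=
  ["more", "increase", "higher", "greater", "improve", "better",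
   "raise", "enhance", "boost", "grow", "leads to", "results in",
   "positively", "correlates with"]

def pvNegKw : List String :=
  ["less", "decrease", "lower", "reduce", "fewer", "worse",
   "decline", "diminish", "drop", "fall", "negatively"]

def infer_expected_direction (hypothesis : String) : String :=
  let hypothesis_lower := PySem.Str.lower hypothesis
  let positive_count : Int :=
    pvPosKw.foldl (fun acc kw => if PySem.Str.isIn kw hypothesis_lower then acc + 1 else acc) 0
  let negative_count : Int :=
    pvNegKw.foldl (fun acc kw => if PySem.Str.isIn kw hypothesis_lower then acc + 1 else acc) 0
  if positive_count > negative_count then "positive"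
  else if negative_count > positive_count then "negative"
  else "unknown"

-- ===== PORT B =====
-- B's keywords, as character lists (the scan works character-by-character on the text).
def pvAllKw : List (List Char) := (pvPosKw ++ pvNegKw).map String.toList

-- body of B's inner 'for kw' loop: text.startswith(kw, i) is (text.drop i).startswith(kw)
-- (exact here: i comes from range(len(text)), so 0 ≤ i ≤ len(text))
def pvScanStep (rest : List Char) (found : PySem.Set (List Char)) : PySem.Set (List Char) :=
  pvAllKw.foldl
    (fun f kw =>
      if ¬ PySem.Set.contains f kw ∧ PySem.Chars.startswith rest kw then PySem.Set.add f kw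
      else f)
    found

-- B's 'for i in range(len(text))' loop (List.range n = range(n) exactly, n = len(text) ≥ 0)
def pvScan (text : List Char) : PySem.Set (List Char) :=
  (List.range text.length).foldl (fun f i => pvScanStep (text.drop i) f) PySem.Set.empty

def infer_expected_direction_alt (hypothesis : String) : String :=
  let text := (PySem.Str.lower hypothesis).toList
  let found := pvScan text
  let p : Int :=
    pvPosKw.foldl (fun acc kw => if PySem.Set.contains found kw.toList then acc + 1 else acc) 0
  let n : Int :=
    pvNegKw.foldl (fun acc kw => if PySem.Set.contains found kw.toList then acc + 1 else acc) 0
  if p > n then "positive"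
  else if n > p then "negative"
  else "unknown"

-- ===== PRECONDITION & SPEC =====
def Spec_infer_expected_direction (hypothesis : String) (out : String) : Prop := out = infer_expected_direction_alt hypothesis
instance (hypothesis : String) (out : String) : Decidable (Spec_infer_expected_direction hypothesis out) := by unfold Spec_infer_expected_direction; infer_instance

-- ===== CLAIM (what is proved, stated in full; the proofs are below) =====
def Claim_equal_infer_expected_direction : Prop := ∀ (hypothesis : String), Dom_infer_expected_direction hypothesis → Spec_infer_expected_direction hypothesis (infer_expected_direction hypothesis)

-- ===== LEMMAS AND PROOFS =====

-- membership after one scan step: found before, or a keyword starting right here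
theorem pv_mem_scanStep (rest : List Char) (found : PySem.Set (List Char)) (y : List Char) :
    y ∈ pvScanStep rest found ↔ y ∈ found ∨ (y ∈ pvAllKw ∧ y <+: rest) := by
  unfold pvScanStep
  have H : ∀ (l : List (List Char)) (f : PySem.Set (List Char)),
      y ∈ l.foldl
        (fun f kw =>
          if ¬ PySem.Set.contains f kw ∧ PySem.Chars.startswith rest kw then PySem.Set.add f kw
          else f) f
      ↔ y ∈ f ∨ (y ∈ l ∧ y <+: rest) := by
    intro l
    induction l with
    | nil => intro f; simp
    | cons k ks ih =>
      intro f
      by_cases hc : (¬ PySem.Set.contains f k ∧ PySem.Chars.startswith rest k)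
      · simp only [List.foldl, if_pos hc, ih, PySem.Set.mem_add]
        have hk : k <+: rest := (PySem.Chars.startswith_iff rest k).mp hc.2
        constructor
        · rintro ((h | h) | ⟨h1, h2⟩)
          · exact Or.inl h
          · exact Or.inr ⟨by simp [h], h ▸ hk⟩
          · exact Or.inr ⟨List.mem_cons_of_mem _ h1, h2⟩
        · rintro (h | ⟨h1, h2⟩)
          · exact Or.inl (Or.inl h)
          · rcases List.mem_cons.mp h1 with h1 | h1
            · exact Or.inl (Or.inr h1)
            · exact Or.inr ⟨h1, h2⟩
      · simp only [List.foldl, if_neg hc, ih]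
        constructor
        · rintro (h | ⟨h1, h2⟩)
          · exact Or.inl h
          · exact Or.inr ⟨List.mem_cons_of_mem _ h1, h2⟩
        · rintro (h | ⟨h1, h2⟩)
          · exact Or.inl h
          · rcases List.mem_cons.mp h1 with h1 | h1
            · subst h1
              by_cases hm : y ∈ f
              · exact Or.inl hm
              · exfalso
                apply hc
                refine ⟨fun hcon => hm ((PySem.Set.contains_iff f y).mp hcon), ?_⟩
                exact (PySem.Chars.startswith_iff rest y).mpr h2
            · exact Or.inr ⟨h1, h2⟩
  exact H pvAllKw found

-- membership after scanning the first n positions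
theorem pv_mem_scan_range (text : List Char) (n : Nat) (found : PySem.Set (List Char))
    (y : List Char) :
    y ∈ (List.range n).foldl (fun f i => pvScanStep (text.drop i) f) found
      ↔ y ∈ found ∨ (y ∈ pvAllKw ∧ ∃ j < n, y <+: text.drop j) := by
  induction n generalizing found with
  | zero => simp
  | succ n ih =>
    rw [List.range_succ, List.foldl_append]
    simp only [List.foldl_cons, List.foldl_nil]
    rw [pv_mem_scanStep, ih]
    constructor
    · rintro ((h | ⟨h1, j, hj, hp⟩) | ⟨h1, h2⟩)
      · exact Or.inl h
      · exact Or.inr ⟨h1, j, Nat.lt_succ_of_lt hj, hp⟩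
      · exact Or.inr ⟨h1, n, Nat.lt_succ_self n, h2⟩
    · rintro (h | ⟨h1, j, hj, hp⟩)
      · exact Or.inl (Or.inl h)
      · rcases Nat.lt_succ_iff_lt_or_eq.mp hj with hj | rfl
        · exact Or.inl (Or.inr ⟨h1, j, hj, hp⟩)
        · exact Or.inr ⟨h1, hp⟩

-- membership after the whole scan: exactly the keywords starting at some position
theorem pv_mem_scan (text : List Char) (y : List Char) (hy : y ≠ []) :
    y ∈ pvScan text ↔ y ∈ pvAllKw ∧ ∃ j, y <+: text.drop j := by
  unfold pvScan
  rw [pv_mem_scan_range]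
  constructor
  · rintro (h | ⟨h1, j, _, hp⟩)
    · simp [PySem.Set.empty] at h
    · exact ⟨h1, j, hp⟩
  · rintro ⟨h1, j, hp⟩
    by_cases hj : j < text.length
    · exact Or.inr ⟨h1, j, hj, hp⟩
    · exfalso
      rw [List.drop_eq_nil_of_le (Nat.le_of_not_lt hj)] at hp
      exact hy (List.prefix_nil.mp hp)

-- every keyword is a nonempty member of the combined table
theorem pv_kw_facts : ∀ kw ∈ pvPosKw ++ pvNegKw, kw.toList ≠ [] ∧ kw.toList ∈ pvAllKw := by
  decide

-- on keywords, membership in the scanned set coincides with A's substring test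
theorem pv_found_iff_isIn (t : String) (kw : String)
    (hkw : kw ∈ pvPosKw ++ pvNegKw) :
    PySem.Set.contains (pvScan t.toList) kw.toList
      = PySem.Str.isIn kw t := by
  obtain ⟨hne, hmem⟩ := pv_kw_facts kw hkw
  have h1 : PySem.Set.contains (pvScan t.toList) kw.toList = true
      ↔ PySem.Str.isIn kw t = true := by
    rw [PySem.Set.contains_iff, pv_mem_scan _ _ hne, PySem.Str.isIn_iff_infix]
    constructor
    · rintro ⟨_, j, hj⟩
      exact (PySem.Chars.isIn_iff_infix _ _).mp
          ((PySem.Chars.exists_prefix_drop_iff_isIn _ _).mp ⟨j, hj⟩)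
    · intro h
      exact ⟨hmem,
        (PySem.Chars.exists_prefix_drop_iff_isIn _ _).mpr ((PySem.Chars.isIn_iff_infix _ _).mpr h)⟩
  cases hA : PySem.Str.isIn kw t
  · cases hB : PySem.Set.contains (pvScan t.toList) kw.toList
    · rfl
    · rw [h1.mp hB] at hA; exact absurd hA (by simp)
  · exact h1.mpr hA

-- the counting folds agree keyword by keyword
theorem pv_fold_eq (t : String) (l : List String) (hl : ∀ kw ∈ l, kw ∈ pvPosKw ++ pvNegKw) :
    ∀ acc : Int,
      l.foldl (fun acc kw => if PySem.Set.contains (pvScan t.toList) kw.toList then acc + 1 else acc) acc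
        = l.foldl (fun acc kw => if PySem.Str.isIn kw t then acc + 1 else acc) acc := by
  induction l with
  | nil => intro acc; rfl
  | cons k ks ih =>
    intro acc
    have hk := hl k (by simp)
    simp only [List.foldl, pv_found_iff_isIn t k hk]
    exact ih (fun kw h => hl kw (by simp [h])) _

-- ===== VERDICT (by name: the statement is the Claim_ definition above) =====
theorem infer_expected_direction_spec : Claim_equal_infer_expected_direction := by
  intro hypothesis _
  unfold Spec_infer_expected_direction infer_expected_direction infer_expected_direction_alt
  dsimp only
  rw [pv_fold_eq (PySem.Str.lower hypothesis) pvPosKw (fun kw h => by simp [h]),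
      pv_fold_eq (PySem.Str.lower hypothesis) pvNegKw (fun kw h => by simp [h])]
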